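-- pv_equiv track=rewrite | github.com/tlack/cproto2atomnif | src/parser.py | resolve_re
-- ===== SOURCE A (Python) =====
-- def resolve_re(re_str):
--     x = re_str
--     access = '(static|const)';
--     identifier = '[a-z0-9:_.]+';
--     pats = {
--         'access': access,
--         'identifier': identifier,
--         # 'modifiers': '((\[\]|\*)+)'     # ex. []
--     }
--     pats['types'] = f'( {access}? \s? (&|\*)? \s* {identifier} )'
--     for code, pat in pats.items():
--         x = x.replace('{'+code+'}', pat)
--     return x
-- ===== SOURCE B (Python) =====
-- def resolve_re(re_str):
--     access = '(static|const)'
--     identifier = '[a-z0-9:_.]+'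
--     types = '( ' + access + '? \s? (&|\*)? \s* ' + identifier + ' )'
--     out = []
--     i = 0
--     n = len(re_str)
--     while i < n:
--         if re_str.startswith('{access}', i):
--             out.append(access)
--             i += 8
--         elif re_str.startswith('{identifier}', i):
--             out.append(identifier)
--             i += 12
--         elif re_str.startswith('{types}', i):
--             out.append(types)
--             i += 7
--         else:
--             out.append(re_str[i])
--             i += 1
--     return ''.join(out)
-- ===== Notes on version B (the rewrite author's own statement) =====
-- stated objective: alternative
-- what changed: A makes three sequential full-string .replace passes (one per placeholder); B makes a single left-to-right scan of the string, substituting whichever of the three placeholders starts at the current position and copying the character otherwise.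
import Mathlib
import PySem

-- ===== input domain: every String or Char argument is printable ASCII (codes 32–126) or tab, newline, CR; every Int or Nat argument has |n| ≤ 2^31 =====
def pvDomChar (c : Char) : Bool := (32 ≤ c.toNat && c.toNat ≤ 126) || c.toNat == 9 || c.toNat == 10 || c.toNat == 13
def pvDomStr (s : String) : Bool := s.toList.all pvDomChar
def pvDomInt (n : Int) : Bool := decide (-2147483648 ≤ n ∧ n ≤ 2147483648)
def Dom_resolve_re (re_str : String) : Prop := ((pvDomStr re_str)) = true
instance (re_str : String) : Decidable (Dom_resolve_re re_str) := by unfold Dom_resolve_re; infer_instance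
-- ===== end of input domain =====

-- B replaces A's three sequential full-string .replace passes by ONE left-to-right scan that
-- substitutes whichever placeholder starts at the current position (objective: alternative single-pass algorithm).

-- ===== PORT A =====
def resolve_re (re_str : String) : String :=
  let access := "(static|const)"
  let identifier := "[a-z0-9:_.]+"
  let pats : PySem.Dict String String :=
    (PySem.Dict.empty.insert "access" access).insert "identifier" identifier
  let pats := pats.insert "types" ("( " ++ access ++ "? \\s? (&|\\*)? \\s* " ++ identifier ++ " )")
  pats.items.foldl (fun x kv => PySem.Str.replace x ("{" ++ kv.1 ++ "}") kv.2) re_str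

-- ===== PORT B =====
-- B-side constants (Source B's access / identifier / types strings and the three placeholder literals)
def accRep : List Char := "(static|const)".toList
def idfRep : List Char := "[a-z0-9:_.]+".toList
def typRep : List Char := "( ".toList ++ accRep ++ "? \\s? (&|\\*)? \\s* ".toList ++ idfRep ++ " )".toList
def pAcc : List Char := "{access}".toList
def pIdf : List Char := "{identifier}".toList
def pTyp : List Char := "{types}".toList

-- the while-loop of Source B: one pass, substituting the placeholder that starts at the cursor
def resolve_re_alt_go (l : List Char) : List Char :=
  match l with
  | [] => []
  | c :: t =>
    if PySem.Chars.startswith (c :: t) pAcc then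
      accRep ++ resolve_re_alt_go (List.drop 8 (c :: t))
    else if PySem.Chars.startswith (c :: t) pIdf then
      idfRep ++ resolve_re_alt_go (List.drop 12 (c :: t))
    else if PySem.Chars.startswith (c :: t) pTyp then
      typRep ++ resolve_re_alt_go (List.drop 7 (c :: t))
    else c :: resolve_re_alt_go t
termination_by l.length
decreasing_by all_goals simp [List.length_drop]

def resolve_re_alt (re_str : String) : String :=
  String.ofList (resolve_re_alt_go re_str.toList)

-- ===== PRECONDITION & SPEC =====
def Spec_resolve_re (re_str : String) (out : String) : Prop := out = resolve_re_alt re_str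
instance (re_str : String) (out : String) : Decidable (Spec_resolve_re re_str out) := by unfold Spec_resolve_re; infer_instance

-- ===== CLAIM (what is proved, stated in full; the proofs are below) =====
def Claim_equal_resolve_re : Prop := ∀ (re_str : String), Dom_resolve_re re_str → Spec_resolve_re re_str (resolve_re re_str)

-- ===== LEMMAS AND PROOFS =====

-- proof-side model of one str.replace pass (old nonempty), structural on the string
def rep (p r : List Char) (l : List Char) : List Char :=
  match l with
  | [] => []
  | c :: t => if p.isPrefixOf (c :: t) then r ++ rep p r (List.drop (p.length - 1) t) else c :: rep p r t
termination_by l.length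
decreasing_by all_goals simp [List.length_drop]

theorem rep_nil (p r : List Char) : rep p r [] = [] := by rw [rep]

theorem rep_cons_pos (p r : List Char) (c : Char) (t : List Char) (h : p.isPrefixOf (c :: t) = true) :
    rep p r (c :: t) = r ++ rep p r (List.drop (p.length - 1) t) := by
  rw [rep]; simp [h]

theorem rep_cons_neg (p r : List Char) (c : Char) (t : List Char) (h : p.isPrefixOf (c :: t) = false) :
    rep p r (c :: t) = c :: rep p r t := by
  rw [rep]; simp [h]

theorem isPrefixOf_false_of_not {p l : List Char} (h : ¬ p <+: l) : p.isPrefixOf l = false := by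
  rw [Bool.eq_false_iff]
  simpa [List.isPrefixOf_iff_prefix] using h

theorem startswith_false_of_not {p l : List Char} (h : ¬ p <+: l) :
    PySem.Chars.startswith l p = false := by
  rw [Bool.eq_false_iff]
  simpa [PySem.Chars.startswith_iff] using h

theorem rep_go_spec (p r : List Char) (hp : p ≠ []) :
    ∀ fuel l acc, l.length ≤ fuel →
      PySem.Chars.replace.go p r fuel l acc = acc.reverse ++ rep p r l := by
  intro fuel
  induction fuel with
  | zero =>
    intro l acc h
    have hl : l = [] := by cases l <;> simp_all
    subst hl
    rw [PySem.Chars.replace.go.eq_def]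
    simp [rep_nil]
  | succ n ih =>
    intro l acc h
    cases l with
    | nil => rw [PySem.Chars.replace.go.eq_def]; simp [rep_nil]
    | cons c t =>
      rw [PySem.Chars.replace.go.eq_def]
      by_cases hpre : p.isPrefixOf (c :: t) = true
      · simp only [hpre, if_true]
        obtain ⟨ph, pt, rfl⟩ : ∃ ph pt, p = ph :: pt := by
          cases p with
          | nil => exact absurd rfl hp
          | cons a b => exact ⟨a, b, rfl⟩
        have hlen : (List.drop (ph :: pt).length (c :: t)).length ≤ n := by
          simp at h ⊢; omega
        rw [ih _ _ hlen]
        rw [rep_cons_pos _ _ _ _ hpre]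
        simp [List.drop_succ_cons]
      · rw [Bool.not_eq_true] at hpre
        simp only [hpre, Bool.false_eq_true, if_false]
        have hlen : t.length ≤ n := by simp at h; omega
        rw [ih _ _ hlen]
        rw [rep_cons_neg _ _ _ _ hpre]
        simp

theorem replace_eq_rep (l p r : List Char) (hp : p ≠ []) :
    PySem.Chars.replace l p r = rep p r l := by
  rw [PySem.Chars.replace]
  have he : p.isEmpty = false := by cases p <;> simp_all
  rw [he]
  simp only [Bool.false_eq_true, if_false]
  rw [rep_go_spec p r hp l.length l [] le_rfl]
  simp

-- a segment with no '{' is copied verbatim by rep (patterns start with '{')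
theorem rep_walk (p r : List Char) (hp : p.head? = some '{') :
    ∀ s t, '{' ∉ s → rep p r (s ++ t) = s ++ rep p r t := by
  intro s
  induction s with
  | nil => intro t _; simp
  | cons c s ih =>
    intro t hs
    have hc : c ≠ '{' := fun h => hs (by simp [h])
    obtain ⟨ph, pt, rfl⟩ : ∃ ph pt, p = ph :: pt := by
      cases p with
      | nil => simp at hp
      | cons a b => exact ⟨a, b, rfl⟩
    have hph : ph = '{' := by simpa using hp
    have hnp : (ph :: pt).isPrefixOf (c :: (s ++ t)) = false := by
      apply isPrefixOf_false_of_not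
      rw [List.cons_prefix_cons]
      rintro ⟨h, -⟩
      exact hc (hph ▸ h.symm)
    rw [List.cons_append, rep_cons_neg _ _ _ _ hnp, ih t (fun h => hs (by simp [h]))]
    simp

-- a matched pattern at the head is replaced
theorem rep_match (p r t : List Char) (hp : p ≠ []) : rep p r (p ++ t) = r ++ rep p r t := by
  obtain ⟨ph, pt, rfl⟩ : ∃ ph pt, p = ph :: pt := by
    cases p with
    | nil => exact absurd rfl hp
    | cons a b => exact ⟨a, b, rfl⟩
  have hpre : (ph :: pt).isPrefixOf ((ph :: pt) ++ t) = true :=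
    List.isPrefixOf_iff_prefix.mpr ⟨t, rfl⟩
  rw [List.cons_append] at hpre ⊢
  rw [rep_cons_pos _ _ _ _ hpre]
  have h1 : (ph :: pt).length - 1 = pt.length := by simp
  rw [h1, List.drop_left]

-- a non-matching '{'-headed position followed by a '{'-free segment is copied verbatim
theorem rep_walk₁ (p r : List Char) (hp : p.head? = some '{') (c : Char) (s t : List Char)
    (h0 : p.isPrefixOf (c :: (s ++ t)) = false) (hs : '{' ∉ s) :
    rep p r (c :: (s ++ t)) = c :: (s ++ rep p r t) := by
  rw [rep_cons_neg _ _ _ _ h0, rep_walk p r hp s t hs]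

-- rep creates no new occurrence: a '{'-free, r.head-free pattern found in the output was in the input
theorem rep_pull (p : List Char) (rh : Char) (rt : List Char) (_hp : p.head? = some '{') :
    ∀ t q, q ≠ [] → '{' ∉ q → rh ∉ q →
      q <+: rep p (rh :: rt) t → q <+: t := by
  intro t
  induction t with
  | nil =>
    intro q hq _ _ hpre
    rw [rep_nil] at hpre
    cases q with
    | nil => exact absurd rfl hq
    | cons a b => exact absurd (List.prefix_nil.mp hpre) (by simp)
  | cons c t ih =>
    intro q hq hqb hqr hpre
    obtain ⟨qc, q', rfl⟩ : ∃ qc q', q = qc :: q' := by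
      cases q with
      | nil => exact absurd rfl hq
      | cons a b => exact ⟨a, b, rfl⟩
    by_cases hm : p.isPrefixOf (c :: t) = true
    · rw [rep_cons_pos _ _ _ _ hm, List.cons_append] at hpre
      rw [List.cons_prefix_cons] at hpre
      exact absurd hpre.1 (fun h => hqr (by simp [h]))
    · rw [Bool.not_eq_true] at hm
      rw [rep_cons_neg _ _ _ _ hm] at hpre
      rw [List.cons_prefix_cons] at hpre ⊢
      refine ⟨hpre.1, ?_⟩
      cases q' with
      | nil => exact List.nil_prefix
      | cons a b =>
        exact ih (a :: b) (by simp) (fun h => hqb (by simp at h ⊢; tauto))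
          (fun h => hqr (by simp at h ⊢; tauto)) hpre.2

-- literal shape facts
theorem pAcc_cons : pAcc = '{' :: "access}".toList := rfl
theorem pIdf_cons : pIdf = '{' :: "identifier}".toList := rfl
theorem pTyp_cons : pTyp = '{' :: "types}".toList := rfl
theorem accRep_cons : accRep = '(' :: "static|const)".toList := rfl
theorem idfRep_cons : idfRep = '[' :: "a-z0-9:_.]+".toList := rfl

theorem idf_not_prefix_typ (X : List Char) : ¬ pIdf <+: ('{' :: ("types}".toList ++ X)) := by
  rw [pIdf_cons]
  rw [show ("types}".toList ++ X) = 't' :: ("ypes}".toList ++ X) from rfl]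
  rw [show ("identifier}".toList : List Char) = 'i' :: "dentifier}".toList from rfl]
  rw [List.cons_prefix_cons, List.cons_prefix_cons]
  rintro ⟨-, h, -⟩
  exact absurd h (by decide)

-- B's scan, one step for each of the four branches
theorem go_acc (t : List Char) : resolve_re_alt_go (pAcc ++ t) = accRep ++ resolve_re_alt_go t := by
  rw [show pAcc ++ t = '{' :: ("access}".toList ++ t) from by rw [pAcc_cons, List.cons_append]]
  rw [resolve_re_alt_go]
  have hs : PySem.Chars.startswith ('{' :: ("access}".toList ++ t)) pAcc = true :=
    (PySem.Chars.startswith_iff _ _).mpr (by rw [pAcc_cons]; exact ⟨t, by simp⟩)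
  simp only [hs, if_true]
  have hd : List.drop 8 ('{' :: ("access}".toList ++ t)) = t := by
    rw [List.drop_succ_cons, show (7 : Nat) = ("access}".toList).length from rfl, List.drop_left]
  rw [hd]

theorem go_idf (t : List Char) (h1 : ¬ pAcc <+: pIdf ++ t) :
    resolve_re_alt_go (pIdf ++ t) = idfRep ++ resolve_re_alt_go t := by
  have hcons : pIdf ++ t = '{' :: ("identifier}".toList ++ t) := by rw [pIdf_cons, List.cons_append]
  rw [hcons]
  have hs1 : PySem.Chars.startswith ('{' :: ("identifier}".toList ++ t)) pAcc = false :=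
    startswith_false_of_not (hcons ▸ h1)
  have hs2 : PySem.Chars.startswith ('{' :: ("identifier}".toList ++ t)) pIdf = true :=
    (PySem.Chars.startswith_iff _ _).mpr (by rw [pIdf_cons]; exact ⟨t, by simp⟩)
  rw [resolve_re_alt_go]
  simp only [hs1, hs2, Bool.false_eq_true, if_false, if_true]
  have hd : List.drop 12 ('{' :: ("identifier}".toList ++ t)) = t := by
    rw [List.drop_succ_cons, show (11 : Nat) = ("identifier}".toList).length from rfl, List.drop_left]
  rw [hd]

theorem go_typ (t : List Char) (h1 : ¬ pAcc <+: pTyp ++ t) (h2 : ¬ pIdf <+: pTyp ++ t) :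
    resolve_re_alt_go (pTyp ++ t) = typRep ++ resolve_re_alt_go t := by
  have hcons : pTyp ++ t = '{' :: ("types}".toList ++ t) := by rw [pTyp_cons, List.cons_append]
  rw [hcons]
  have hs1 : PySem.Chars.startswith ('{' :: ("types}".toList ++ t)) pAcc = false :=
    startswith_false_of_not (hcons ▸ h1)
  have hs2 : PySem.Chars.startswith ('{' :: ("types}".toList ++ t)) pIdf = false :=
    startswith_false_of_not (hcons ▸ h2)
  have hs3 : PySem.Chars.startswith ('{' :: ("types}".toList ++ t)) pTyp = true :=
    (PySem.Chars.startswith_iff _ _).mpr (by rw [pTyp_cons]; exact ⟨t, by simp⟩)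
  rw [resolve_re_alt_go]
  simp only [hs1, hs2, hs3, Bool.false_eq_true, if_false, if_true]
  have hd : List.drop 7 ('{' :: ("types}".toList ++ t)) = t := by
    rw [List.drop_succ_cons, show (6 : Nat) = ("types}".toList).length from rfl, List.drop_left]
  rw [hd]

theorem go_step (c : Char) (t : List Char) (h1 : ¬ pAcc <+: c :: t) (h2 : ¬ pIdf <+: c :: t)
    (h3 : ¬ pTyp <+: c :: t) :
    resolve_re_alt_go (c :: t) = c :: resolve_re_alt_go t := by
  rw [resolve_re_alt_go]
  simp only [startswith_false_of_not h1, startswith_false_of_not h2, startswith_false_of_not h3,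
    Bool.false_eq_true, if_false]

-- the heart: three sequential passes equal B's one-pass scan
theorem three_passes_eq_scan :
    ∀ n l, l.length ≤ n →
      rep pTyp typRep (rep pIdf idfRep (rep pAcc accRep l)) = resolve_re_alt_go l := by
  intro n
  induction n with
  | zero =>
    intro l hl
    have : l = [] := by cases l <;> simp_all
    subst this
    rw [rep_nil, rep_nil, rep_nil, resolve_re_alt_go]
  | succ n ih =>
    intro l hl
    cases l with
    | nil => rw [rep_nil, rep_nil, rep_nil, resolve_re_alt_go]
    | cons c t =>
      by_cases h1 : pAcc <+: c :: t
      · obtain ⟨t', ht⟩ := h1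
        rw [← ht]
        have hlen : t'.length ≤ n := by
          have := congrArg List.length ht
          simp [show pAcc.length = 8 from rfl] at this
          simp at hl
          omega
        rw [rep_match pAcc accRep t' (by decide)]
        rw [rep_walk pIdf idfRep rfl accRep _ (by decide)]
        rw [rep_walk pTyp typRep rfl accRep _ (by decide)]
        rw [ih t' hlen, go_acc]
      · by_cases h2 : pIdf <+: c :: t
        · obtain ⟨t', ht⟩ := h2
          rw [← ht]
          have hlen : t'.length ≤ n := by
            have := congrArg List.length ht
            simp [show pIdf.length = 12 from rfl] at this
            simp at hl
            omega
          have h1' : ¬ pAcc <+: pIdf ++ t' := ht ▸ h1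
          have step1 : rep pAcc accRep (pIdf ++ t') = pIdf ++ rep pAcc accRep t' := by
            rw [show pIdf ++ t' = '{' :: ("identifier}".toList ++ t') from by
              rw [pIdf_cons, List.cons_append]]
            rw [rep_walk₁ pAcc accRep rfl '{' _ t'
              (isPrefixOf_false_of_not (by
                rw [show ('{' :: ("identifier}".toList ++ t')) = pIdf ++ t' from by
                  rw [pIdf_cons, List.cons_append]]
                exact h1'))
              (by decide)]
            rw [pIdf_cons, List.cons_append]
          rw [step1, rep_match pIdf idfRep _ (by decide)]
          rw [rep_walk pTyp typRep rfl idfRep _ (by decide)]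
          rw [ih t' hlen, go_idf t' h1']
        · by_cases h3 : pTyp <+: c :: t
          · obtain ⟨t', ht⟩ := h3
            rw [← ht]
            have hlen : t'.length ≤ n := by
              have := congrArg List.length ht
              simp [show pTyp.length = 7 from rfl] at this
              simp at hl
              omega
            have h1' : ¬ pAcc <+: pTyp ++ t' := ht ▸ h1
            have h2' : ¬ pIdf <+: pTyp ++ t' := ht ▸ h2
            have hctyp : pTyp ++ t' = '{' :: ("types}".toList ++ t') := by
              rw [pTyp_cons, List.cons_append]
            have step1 : rep pAcc accRep (pTyp ++ t') = pTyp ++ rep pAcc accRep t' := by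
              rw [hctyp]
              rw [rep_walk₁ pAcc accRep rfl '{' _ t'
                (isPrefixOf_false_of_not (hctyp ▸ h1')) (by decide)]
              rw [pTyp_cons, List.cons_append]
            have step2 : ∀ X, rep pIdf idfRep (pTyp ++ X) = pTyp ++ rep pIdf idfRep X := by
              intro X
              have hX : pTyp ++ X = '{' :: ("types}".toList ++ X) := by
                rw [pTyp_cons, List.cons_append]
              rw [hX]
              rw [rep_walk₁ pIdf idfRep rfl '{' _ X
                (isPrefixOf_false_of_not (idf_not_prefix_typ X)) (by decide)]
              rw [pTyp_cons, List.cons_append]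
            rw [step1, step2, rep_match pTyp typRep _ (by decide)]
            rw [ih t' hlen, go_typ t' h1' h2']
          · -- no placeholder starts here: every pass copies c
            have hA : pAcc.isPrefixOf (c :: t) = false := isPrefixOf_false_of_not h1
            have hlen : t.length ≤ n := by simp at hl; omega
            rw [rep_cons_neg _ _ _ _ hA]
            have n2 : pIdf.isPrefixOf (c :: rep pAcc accRep t) = false := by
              apply isPrefixOf_false_of_not
              rw [pIdf_cons, List.cons_prefix_cons]
              rintro ⟨hc, hq⟩
              have : ("identifier}".toList : List Char) <+: t := by
                rw [accRep_cons] at hq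
                exact rep_pull pAcc '(' _ rfl t _ (by decide) (by decide) (by decide) hq
              exact h2 (by rw [pIdf_cons, ← hc]; exact List.cons_prefix_cons.mpr ⟨rfl, this⟩)
            rw [rep_cons_neg _ _ _ _ n2]
            have n3 : pTyp.isPrefixOf (c :: rep pIdf idfRep (rep pAcc accRep t)) = false := by
              apply isPrefixOf_false_of_not
              rw [pTyp_cons, List.cons_prefix_cons]
              rintro ⟨hc, hq⟩
              have s1 : ("types}".toList : List Char) <+: rep pAcc accRep t := by
                rw [idfRep_cons] at hq
                exact rep_pull pIdf '[' _ rfl _ _ (by decide) (by decide) (by decide) hq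
              have s2 : ("types}".toList : List Char) <+: t := by
                rw [accRep_cons] at s1
                exact rep_pull pAcc '(' _ rfl t _ (by decide) (by decide) (by decide) s1
              exact h3 (by rw [pTyp_cons, ← hc]; exact List.cons_prefix_cons.mpr ⟨rfl, s2⟩)
            rw [rep_cons_neg _ _ _ _ n3]
            rw [ih t hlen, go_step c t h1 h2 h3]

theorem A_eq_rep (s : String) :
    resolve_re s = String.ofList (rep pTyp typRep (rep pIdf idfRep (rep pAcc accRep s.toList))) := by
  have e1 : resolve_re s
      = PySem.Str.replace (PySem.Str.replace (PySem.Str.replace s "{access}" "(static|const)")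
          "{identifier}" "[a-z0-9:_.]+") "{types}" "( (static|const)? \\s? (&|\\*)? \\s* [a-z0-9:_.]+ )" := rfl
  rw [e1]
  simp only [PySem.Str.replace]
  rw [replace_eq_rep _ _ _ (by decide), replace_eq_rep _ _ _ (by decide),
    replace_eq_rep _ _ _ (by decide)]
  simp
  rfl

-- ===== VERDICT (by name: the statement is the Claim_ definition above) =====
theorem resolve_re_spec : Claim_equal_resolve_re := by
  unfold Claim_equal_resolve_re Spec_resolve_re
  intro s _
  rw [A_eq_rep s, three_passes_eq_scan s.toList.length s.toList le_rfl]
  rfl
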